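-- pv_equiv track=rewrite | github.com/polaires/Banta_Lab_RFdiffusion | backend/serverless/inference_utils.py | restore_metal_to_pdb
-- ===== SOURCE A (Python) =====
-- from typing import Dict, Any, Optional, List, Tuple
--
-- def restore_metal_to_pdb(pdb_content: str, metal_lines: List[str]) -> str:
--     """
--     Add metal HETATM records back to PDB content.
--
--     Args:
--         pdb_content: PDB file content without metal
--         metal_lines: List of metal HETATM lines to restore
--
--     Returns:
--         PDB content with metal atoms restored
--     """
--     if not metal_lines:
--         return pdb_content
--
--     lines = pdb_content.split('\n')
--     result_lines = []
--
--     # Find where to insert metal (before END or at end of ATOM/HETATM records)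
--     inserted = False
--     for line in lines:
--         if line.startswith('END') and not inserted:
--             # Insert metal lines before END
--             result_lines.extend(metal_lines)
--             inserted = True
--         result_lines.append(line)
--
--     # If no END found, append at end
--     if not inserted:
--         result_lines.extend(metal_lines)
--
--     return '\n'.join(result_lines)
-- ===== SOURCE B (Python) =====
-- from typing import List
--
-- def restore_metal_to_pdb(pdb_content: str, metal_lines: List[str]) -> str:
--     """Locate the first END line, then splice the metal lines in before it."""
--     if not metal_lines:
--         return pdb_content
--     lines = pdb_content.split('\n')
--     idx = next((i for i, l in enumerate(lines) if l.startswith('END')), len(lines))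
--     return '\n'.join(lines[:idx] + metal_lines + lines[idx:])
-- ===== Notes on version B (the rewrite author's own statement) =====
-- stated objective: simpler
-- what changed: Replaces the scan-and-append loop with its 'inserted' flag by locating the first END-prefixed line's index and splicing metal_lines in with one slice expression.
import Mathlib
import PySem

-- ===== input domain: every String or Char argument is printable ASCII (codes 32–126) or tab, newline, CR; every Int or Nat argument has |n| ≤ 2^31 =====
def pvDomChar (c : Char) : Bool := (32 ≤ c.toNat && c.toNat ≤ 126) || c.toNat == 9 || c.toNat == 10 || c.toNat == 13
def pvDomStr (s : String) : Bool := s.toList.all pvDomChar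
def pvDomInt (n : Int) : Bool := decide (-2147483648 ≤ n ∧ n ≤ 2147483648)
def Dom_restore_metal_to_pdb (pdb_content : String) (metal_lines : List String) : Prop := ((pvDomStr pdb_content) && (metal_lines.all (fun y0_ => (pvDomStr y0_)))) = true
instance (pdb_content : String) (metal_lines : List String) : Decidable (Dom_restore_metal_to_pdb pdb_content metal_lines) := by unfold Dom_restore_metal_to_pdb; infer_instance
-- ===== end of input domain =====

-- B replaces A's scan-and-append loop (with its 'inserted' flag) by locating the first
-- END-prefixed line and splicing metal_lines in with one slice expression (simpler).

-- shared by both ports: pdb_content.split('\n') — the separator is the nonempty literal "\n",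
-- so PySem.Str.split? is always `some`; getD [] just realises that
def pvSplitLines (pdb_content : String) : List String := (PySem.Str.split? pdb_content "\n").getD []

-- ===== PORT A =====
-- one loop step of A: maybe insert metal before an END line, then append the line
def pvStepA (metal_lines : List String) (acc : List String × Bool) (line : String) : List String × Bool :=
  let acc' := if PySem.Str.startswith line "END" && !acc.2 then (acc.1 ++ metal_lines, true) else acc
  (acc'.1 ++ [line], acc'.2)

def restore_metal_to_pdb (pdb_content : String) (metal_lines : List String) : String :=
  if metal_lines = [] then pdb_content
  else
    let lines := pvSplitLines pdb_content
    let st := lines.foldl (pvStepA metal_lines) ([], false)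
    let result_lines := if st.2 then st.1 else st.1 ++ metal_lines
    PySem.Str.join "\n" result_lines

-- ===== PORT B =====
def restore_metal_to_pdb_alt (pdb_content : String) (metal_lines : List String) : String :=
  if metal_lines = [] then pdb_content
  else
    let lines := pvSplitLines pdb_content
    -- idx = first index whose line starts with "END" (default len(lines)); splice there
    let pre := lines.takeWhile (fun l => !PySem.Str.startswith l "END")
    let post := lines.dropWhile (fun l => !PySem.Str.startswith l "END")
    PySem.Str.join "\n" (pre ++ metal_lines ++ post)

-- ===== PRECONDITION & SPEC =====
def Spec_restore_metal_to_pdb (pdb_content : String) (metal_lines : List String) (out : String) : Prop := out = restore_metal_to_pdb_alt pdb_content metal_lines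
instance (pdb_content : String) (metal_lines : List String) (out : String) : Decidable (Spec_restore_metal_to_pdb pdb_content metal_lines out) := by unfold Spec_restore_metal_to_pdb; infer_instance

-- ===== CLAIM (what is proved, stated in full; the proofs are below) =====
def Claim_equal_restore_metal_to_pdb : Prop := ∀ (pdb_content : String) (metal_lines : List String), Dom_restore_metal_to_pdb pdb_content metal_lines → Spec_restore_metal_to_pdb pdb_content metal_lines (restore_metal_to_pdb pdb_content metal_lines)

-- ===== LEMMAS AND PROOFS =====

-- once inserted, A's loop just appends the remaining lines
theorem pvStepA_true (metal_lines acc lines : List String) :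
    lines.foldl (pvStepA metal_lines) (acc, true) = (acc ++ lines, true) := by
  induction lines generalizing acc with
  | nil => simp
  | cons l ls ih => simp [pvStepA, ih]

-- A's loop from an uninserted state: splice at the first END line (flag says whether one was found)
theorem pvStepA_false (metal_lines acc lines : List String) :
    lines.foldl (pvStepA metal_lines) (acc, false) =
      if lines.any (fun l => PySem.Str.startswith l "END") then
        (acc ++ lines.takeWhile (fun l => !PySem.Str.startswith l "END") ++ metal_lines
             ++ lines.dropWhile (fun l => !PySem.Str.startswith l "END"), true)
      else (acc ++ lines, false) := by
  induction lines generalizing acc with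
  | nil => simp
  | cons l ls ih =>
    by_cases h : PySem.Chars.startswith l.toList ['E', 'N', 'D'] = true
    · simp [pvStepA, h, pvStepA_true]
    · simp [pvStepA, h, ih]

-- ===== VERDICT (by name: the statement is the Claim_ definition above) =====
theorem restore_metal_to_pdb_spec : Claim_equal_restore_metal_to_pdb := by
  intro pdb_content metal_lines _
  unfold Spec_restore_metal_to_pdb restore_metal_to_pdb restore_metal_to_pdb_alt
  by_cases hm : metal_lines = []
  · simp [hm]
  · simp only [hm, if_false]
    rw [pvStepA_false]
    by_cases h : ∃ x ∈ pvSplitLines pdb_content, PySem.Chars.startswith x.toList ['E', 'N', 'D'] = true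
    · simp [h]
    · have hall : ∀ x ∈ pvSplitLines pdb_content, ¬ PySem.Chars.startswith x.toList ['E', 'N', 'D'] = true :=
        fun x hx hs => h ⟨x, hx, hs⟩
      have ht : List.takeWhile (fun l => !PySem.Chars.startswith l.toList ['E', 'N', 'D']) (pvSplitLines pdb_content)
          = pvSplitLines pdb_content :=
        List.takeWhile_eq_self_iff.mpr (fun x hx => by simp [hall x hx])
      have hd : List.dropWhile (fun l => !PySem.Chars.startswith l.toList ['E', 'N', 'D']) (pvSplitLines pdb_content)
          = [] :=
        List.dropWhile_eq_nil_iff.mpr (fun x hx => by simp [hall x hx])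
      simp [h, ht, hd]
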